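-- pv_equiv track=rewrite | github.com/EBI-Metagenomics/imm | script/update_gc.py | fix_newline_between_quotes
-- ===== SOURCE A (Python) =====
-- def fix_newline_between_quotes(rows):
--     open_quote = False
--     new_rows = []
--     for r in rows:
--         if not open_quote:
--             new_rows.append(r)
--         else:
--             new_rows[-1] += " " + r
--         open_quote ^= r.count("\"") % 2 == 1
--     return new_rows
-- ===== SOURCE B (Python) =====
-- def fix_newline_between_quotes(rows):
--     prefix = [0]
--     for r in rows:
--         prefix.append(prefix[-1] + r.count('"'))
--     starts = [i for i in range(len(rows)) if prefix[i] % 2 == 0]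
--     ends = starts[1:] + [len(rows)]
--     return [" ".join(rows[b:e]) for b, e in zip(starts, ends)]
-- ===== Notes on version B (the rewrite author's own statement) =====
-- stated objective: alternative
-- what changed: B replaces A's streaming toggle-and-merge-into-last-row with a staged index computation: a prefix-sum pass over quote counts, a boundary list of row indices with even parity, and one slice-and-join per logical row; no merge state or in-place concatenation exists.
import Mathlib
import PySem

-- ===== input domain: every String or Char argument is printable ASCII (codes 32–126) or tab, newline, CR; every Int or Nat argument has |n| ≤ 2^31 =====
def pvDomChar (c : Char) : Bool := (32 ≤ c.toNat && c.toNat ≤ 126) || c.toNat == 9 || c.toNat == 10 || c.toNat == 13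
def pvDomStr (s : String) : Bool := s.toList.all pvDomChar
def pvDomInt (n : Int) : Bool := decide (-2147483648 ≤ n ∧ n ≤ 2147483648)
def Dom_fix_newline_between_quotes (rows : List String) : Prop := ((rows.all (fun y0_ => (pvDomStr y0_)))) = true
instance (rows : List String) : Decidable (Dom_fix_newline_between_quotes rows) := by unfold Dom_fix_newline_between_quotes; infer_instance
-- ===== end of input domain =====

-- B rebuilds the merged rows by staged index computation (quote-count prefix sums, even-parity
-- boundary indices, slice-and-join per logical row) instead of A's streaming merge into the last
-- output row; return values proved equal.

-- ===== PORT A =====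
-- state = (open_quote, new_rows); 'new_rows[-1] += " " + r' is dropLast ++ [getLast! ++ " " ++ r]
def fix_newline_between_quotes (rows : List String) : List String :=
  (rows.foldl (fun (st : Bool × List String) r =>
      let new_rows :=
        if !st.1 then st.2 ++ [r]
        else st.2.dropLast ++ [st.2.getLast! ++ " " ++ r]
      (xor st.1 (PySem.Str.count r "\"" % 2 == 1), new_rows))
    (false, [])).2

-- ===== PORT B =====
-- stage 1: prefix = quote-count prefix sums ('prefix[-1]' is getLast!: prefix is never empty);
-- stage 2: starts = indices of even parity ('prefix[i]' via pyGet?; i < len(rows) < len(prefix),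
--          so the .getD 0 default is never reached); stage 3: slice-and-join per (start, end) pair
def fix_newline_between_quotes_alt (rows : List String) : List String :=
  let pref := rows.foldl
    (fun (acc : List Int) r => acc ++ [acc.getLast! + (PySem.Str.count r "\"" : Int)]) [0]
  let starts := (PySem.List.pyRange 0 (rows.length : Int) 1).filter
    (fun i => PySem.Int.mod ((PySem.List.pyGet? pref i).getD 0) 2 == 0)
  let ends := starts.drop 1 ++ [(rows.length : Int)]
  (starts.zip ends).map (fun be => PySem.Str.join " " (PySem.List.slice rows (some be.1) (some be.2)))

-- ===== PRECONDITION & SPEC =====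
def Spec_fix_newline_between_quotes (rows : List String) (out : List String) : Prop := out = fix_newline_between_quotes_alt rows
instance (rows : List String) (out : List String) : Decidable (Spec_fix_newline_between_quotes rows out) := by unfold Spec_fix_newline_between_quotes; infer_instance

-- ===== CLAIM (what is proved, stated in full; the proofs are below) =====
def Claim_equal_fix_newline_between_quotes : Prop := ∀ (rows : List String), Dom_fix_newline_between_quotes rows → Spec_fix_newline_between_quotes rows (fix_newline_between_quotes rows)

-- ===== LEMMAS AND PROOFS =====

-- abbreviations for the proofs: quote count of a row, partial sums, the buffered middleman
def pvCnt (r : String) : Nat := PySem.Str.count r "\""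

def pvS (rows : List String) (i : Nat) : Nat := ((rows.take i).map pvCnt).sum

-- length of the first emitted segment: shortest nonempty prefix whose quote-parity equals t
def pvSeg : Bool → List String → Nat
  | _, [] => 0
  | t, r :: rest => if (pvCnt r % 2 == 1) == t then 1 else 1 + pvSeg true rest

-- Nat-level reading of B's three stages
def pvStarts (rows : List String) : List Nat :=
  (List.range rows.length).filter (fun i => pvS rows i % 2 == 0)

def pvSegs (rows : List String) : List String :=
  ((pvStarts rows).zip ((pvStarts rows).drop 1 ++ [rows.length])).map
    (fun be => PySem.Str.join " " (List.take (be.2 - be.1) (List.drop be.1 rows)))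

-- middleman: accumulate-then-flush buffer loop (state = (cur, inside, out))
def pvStep (st : List String × Bool × List String) (r : String) : List String × Bool × List String :=
  let cur := st.1 ++ [r]
  let inside := xor st.2.1 (pvCnt r % 2 == 1)
  if !inside then ([], false, st.2.2 ++ [PySem.Str.join " " cur])
  else (cur, inside, st.2.2)

def pvFlush (st : List String × Bool × List String) : List String :=
  if st.1 ≠ [] then st.2.2 ++ [PySem.Str.join " " st.1] else st.2.2

def pvBuf (rows : List String) : List String := pvFlush (rows.foldl pvStep ([], false, []))

-- ---- string-join facts ----
theorem chars_join_append_singleton (sep : List Char) (p : List Char) (ps : List (List Char)) (x : List Char) :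
    PySem.Chars.join sep (p :: (ps ++ [x])) = PySem.Chars.join sep (p :: ps) ++ sep ++ x := by
  induction ps generalizing p with
  | nil => simp [PySem.Chars.join_cons_cons, PySem.Chars.join_singleton]
  | cons q t ih =>
    rw [List.cons_append, PySem.Chars.join_cons_cons, ih q, PySem.Chars.join_cons_cons]
    simp

theorem str_join_append_singleton (xs : List String) (x : String) (h : xs ≠ []) :
    PySem.Str.join " " (xs ++ [x]) = PySem.Str.join " " xs ++ " " ++ x := by
  cases xs with
  | nil => simp at h
  | cons p ps =>
    apply String.toList_injective
    simp [PySem.Str.toList_join]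
    have := chars_join_append_singleton [' '] p.toList (ps.map String.toList) x.toList
    simpa using this

theorem getLast!_append_singleton {α : Type} [Inhabited α] (out : List α) (x : α) : (out ++ [x]).getLast! = x := by
  induction out with
  | nil => rfl
  | cons a t ih =>
    cases t with
    | nil => rfl
    | cons b u => simpa using ih

theorem str_join_singleton (x : String) : PySem.Str.join " " [x] = x := by
  apply String.toList_injective
  simp [PySem.Str.toList_join, PySem.Chars.join_singleton]

-- ---- A = pvBuf : coupled invariant between A's merge state and the buffer state ----
theorem loops_eq : ∀ (rows : List String) (out cur : List String) (q : Bool),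
    (q = true → cur ≠ []) → (q = false → cur = []) →
    (rows.foldl (fun (st : Bool × List String) r =>
        let new_rows :=
          if !st.1 then st.2 ++ [r]
          else st.2.dropLast ++ [st.2.getLast! ++ " " ++ r]
        (xor st.1 (PySem.Str.count r "\"" % 2 == 1), new_rows))
      (q, if q then out ++ [PySem.Str.join " " cur] else out)).2 =
    pvFlush (rows.foldl pvStep (cur, q, out)) := by
  intro rows
  induction rows with
  | nil =>
    intro out cur q h1 h0
    cases q with
    | false => simp [h0 rfl, pvFlush]
    | true => simp [h1 rfl, pvFlush]
  | cons r rest ih =>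
    intro out cur q h1 h0
    cases q with
    | false =>
      have hc : cur = [] := h0 rfl
      subst hc
      simp only [List.foldl_cons]
      cases hodd : (PySem.Str.count r "\"" % 2 == 1) with
      | false =>
        have hm : PySem.Chars.count r.toList ['\"'] % 2 = 0 := by
          have h := hodd; simp at h
          have := Nat.mod_two_eq_zero_or_one (PySem.Chars.count r.toList ['\"']); omega
        have := ih (out ++ [r]) [] false (by simp) (fun _ => rfl)
        simpa [pvStep, pvCnt, hodd, hm, str_join_singleton] using this
      | true =>
        have hm : PySem.Chars.count r.toList ['\"'] % 2 = 1 := by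
          have h := hodd; simpa using h
        have := ih out [r] true (by simp) (by simp)
        simpa [pvStep, pvCnt, hodd, hm, str_join_singleton] using this
    | true =>
      have hc : cur ≠ [] := h1 rfl
      simp only [List.foldl_cons]
      have hdrop : (out ++ [PySem.Str.join " " cur]).dropLast = out := by simp
      have hlast : (out ++ [PySem.Str.join " " cur]).getLast! = PySem.Str.join " " cur :=
        getLast!_append_singleton out _
      cases hodd : (PySem.Str.count r "\"" % 2 == 1) with
      | false =>
        have hm : PySem.Chars.count r.toList ['\"'] % 2 = 0 := by
          have h := hodd; simp at h
          have := Nat.mod_two_eq_zero_or_one (PySem.Chars.count r.toList ['\"']); omega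
        have := ih out (cur ++ [r]) true (by simp) (by simp)
        simpa [pvStep, pvCnt, hodd, hm, hdrop, hlast, str_join_append_singleton cur r hc] using this
      | true =>
        have hm : PySem.Chars.count r.toList ['\"'] % 2 = 1 := by
          have h := hodd; simpa using h
        have := ih (out ++ [PySem.Str.join " " cur ++ " " ++ r]) [] false (by simp) (fun _ => rfl)
        simpa [pvStep, pvCnt, hodd, hm, hdrop, hlast, str_join_append_singleton cur r hc] using this

theorem a_eq_buf (rows : List String) : fix_newline_between_quotes rows = pvBuf rows := by
  unfold fix_newline_between_quotes pvBuf
  have := loops_eq rows [] [] false (by simp) (fun _ => rfl)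
  simpa using this

-- ---- peel lemmas for the buffer loop ----
theorem pvStep_eval (cur : List String) (q : Bool) (out : List String) (r : String) :
    pvStep (cur, q, out) r =
      if xor q (pvCnt r % 2 == 1) then (cur ++ [r], xor q (pvCnt r % 2 == 1), out)
      else ([], false, out ++ [PySem.Str.join " " (cur ++ [r])]) := by
  unfold pvStep
  rcases h : xor q (pvCnt r % 2 == 1) <;> simp

theorem flush_out (rest : List String) : ∀ (cur : List String) (q : Bool) (out : List String),
    pvFlush (rest.foldl pvStep (cur, q, out)) = out ++ pvFlush (rest.foldl pvStep (cur, q, [])) := by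
  induction rest with
  | nil => intro cur q out; by_cases h : cur = [] <;> simp [pvFlush, h]
  | cons r t ih =>
    intro cur q out
    simp only [List.foldl_cons, pvStep_eval]
    rcases h : xor q (pvCnt r % 2 == 1) with _ | _
    · simp only [Bool.false_eq_true, if_false, List.nil_append]
      rw [ih, ih [] false [PySem.Str.join " " (cur ++ [r])]]
      simp
    · simp only [if_true]
      exact ih (cur ++ [r]) true out

theorem seg_peel_true (rest : List String) : ∀ (cur : List String), cur ≠ [] →
    pvFlush (rest.foldl pvStep (cur, true, [])) =
      PySem.Str.join " " (cur ++ rest.take (pvSeg true rest)) :: pvBuf (rest.drop (pvSeg true rest)) := by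
  induction rest with
  | nil => intro cur hc; simp [pvFlush, hc, pvSeg, pvBuf]
  | cons r t ih =>
    intro cur hc
    simp only [List.foldl_cons, pvStep_eval]
    cases hodd : (pvCnt r % 2 == 1) with
    | true =>
      simp only [Bool.xor_true, Bool.not_true, Bool.false_eq_true, if_false]
      rw [flush_out]
      simp [pvSeg, hodd, pvBuf]
    | false =>
      simp only [Bool.xor_false, if_true]
      rw [ih (cur ++ [r]) (by simp)]
      have h1 : (1 : Nat) + pvSeg true t = pvSeg true t + 1 := Nat.add_comm _ _
      simp [pvSeg, hodd, h1]

theorem buf_peel (r : String) (rest : List String) :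
    pvBuf (r :: rest) =
      PySem.Str.join " " ((r :: rest).take (pvSeg false (r :: rest))) ::
        pvBuf ((r :: rest).drop (pvSeg false (r :: rest))) := by
  unfold pvBuf
  simp only [List.foldl_cons, pvStep_eval]
  cases hodd : (pvCnt r % 2 == 1) with
  | false =>
    simp only [Bool.xor_false, Bool.false_eq_true, if_false]
    rw [flush_out]
    simp [pvSeg, hodd, str_join_singleton]
  | true =>
    simp only [Bool.false_xor, if_true, List.nil_append]
    rw [seg_peel_true rest [r] (by simp)]
    have h1 : (1 : Nat) + pvSeg true rest = pvSeg true rest + 1 := Nat.add_comm _ _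
    simp [pvSeg, hodd, h1, pvBuf]

-- ---- arithmetic facts about pvSeg ----
theorem pvSeg_le (t : Bool) (rows : List String) : pvSeg t rows ≤ rows.length := by
  induction rows generalizing t with
  | nil => simp [pvSeg]
  | cons r rest ih =>
    simp only [pvSeg, List.length_cons]
    split
    · omega
    · have := ih true; omega

theorem pvSeg_pos (t : Bool) (r : String) (rest : List String) : 1 ≤ pvSeg t (r :: rest) := by
  simp only [pvSeg]; split <;> omega

-- inside the first segment the running parity never matches the target, and at its end it does
theorem pvSeg_true_spec (rest : List String) :
    (∀ i, 1 ≤ i → i < pvSeg true rest → ((rest.take i).map pvCnt).sum % 2 = 0) ∧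
      (pvSeg true rest < rest.length → ((rest.take (pvSeg true rest)).map pvCnt).sum % 2 = 1) := by
  induction rest with
  | nil => simp [pvSeg]
  | cons r t ih =>
    simp only [pvSeg]
    cases hodd : (pvCnt r % 2 == 1) with
    | true =>
      have h1 : pvCnt r % 2 = 1 := by simpa using hodd
      rw [if_pos (by simp)]
      constructor
      · intro i hi1 hi; omega
      · intro _; simpa using h1
    | false =>
      have h0 : pvCnt r % 2 = 0 := by
        have := Nat.mod_two_eq_zero_or_one (pvCnt r)
        simp at hodd; omega
      rw [if_neg (by simp)]
      constructor
      · intro i hi1 hi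
        cases i with
        | zero => omega
        | succ j =>
          cases j with
          | zero => simpa using h0
          | succ m =>
            have := ih.1 (m + 1) (by omega) (by omega)
            simp only [List.take_succ_cons, List.map_cons, List.sum_cons]
            omega
      · intro hlt
        have hlt' : pvSeg true t < t.length := by simp at hlt; omega
        have := ih.2 hlt'
        have h1 : (1 : Nat) + pvSeg true t = pvSeg true t + 1 := Nat.add_comm _ _
        rw [h1, List.take_succ_cons]
        simp only [List.map_cons, List.sum_cons]
        omega

theorem pvS_cons (r : String) (rest : List String) (j : Nat) :
    pvS (r :: rest) (j + 1) = pvCnt r + ((rest.take j).map pvCnt).sum := by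
  simp [pvS]

theorem pvSeg_spec (rows : List String) :
    (∀ i, 1 ≤ i → i < pvSeg false rows → pvS rows i % 2 = 1) ∧
      (pvSeg false rows < rows.length → pvS rows (pvSeg false rows) % 2 = 0) := by
  cases rows with
  | nil => simp [pvSeg]
  | cons r rest =>
    simp only [pvSeg]
    cases hodd : (pvCnt r % 2 == 1) with
    | false =>
      have h0 : pvCnt r % 2 = 0 := by
        have := Nat.mod_two_eq_zero_or_one (pvCnt r)
        simp at hodd; omega
      rw [if_pos (by simp)]
      constructor
      · intro i hi1 hi; omega
      · intro _
        have : pvS (r :: rest) 1 = pvCnt r := by simp [pvS]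
        omega
    | true =>
      have h1 : pvCnt r % 2 = 1 := by simpa using hodd
      rw [if_neg (by simp)]
      obtain ⟨hmid, hend⟩ := pvSeg_true_spec rest
      constructor
      · intro i hi1 hi
        cases i with
        | zero => omega
        | succ j =>
          rw [pvS_cons]
          cases j with
          | zero => simpa using h1
          | succ m =>
            have := hmid (m + 1) (by omega) (by omega)
            omega
      · intro hlt
        have hlt' : pvSeg true rest < rest.length := by
          simp only [List.length_cons] at hlt; omega
        have := hend hlt'
        have : pvS (r :: rest) (1 + pvSeg true rest) % 2 = 0 := by
          rw [Nat.add_comm, pvS_cons]; omega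
        simpa [Nat.add_comm] using this

-- ---- peel lemma for the staged index computation ----
theorem pvS_zero (rows : List String) : pvS rows 0 = 0 := by simp [pvS]

theorem pvS_split (rows : List String) (k j : Nat) :
    pvS rows (k + j) = pvS rows k + pvS (rows.drop k) j := by
  simp [pvS, List.take_add]

theorem starts_peel (r : String) (rest : List String) :
    pvStarts (r :: rest) =
      0 :: (pvStarts ((r :: rest).drop (pvSeg false (r :: rest)))).map (· + pvSeg false (r :: rest)) := by
  set rows := r :: rest with hrows
  set k := pvSeg false rows with hk
  have hk1 : 1 ≤ k := pvSeg_pos false r rest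
  have hkle : k ≤ rows.length := pvSeg_le false rows
  obtain ⟨hmid, hend⟩ := pvSeg_spec rows
  rw [← hk] at hmid hend
  have hsplit : rows.length = k + (rows.length - k) := by omega
  unfold pvStarts
  rw [hsplit, List.range_add, List.filter_append, List.filter_map]
  have hfirst : (List.range k).filter (fun i => pvS rows i % 2 == 0) = [0] := by
    have : k = (k - 1) + 1 := by omega
    rw [this, List.range_succ_eq_map]
    rw [List.filter_cons_of_pos (by simp [pvS_zero])]
    rw [List.filter_map]
    have : List.filter ((fun i => pvS rows i % 2 == 0) ∘ Nat.succ) (List.range (k - 1)) = [] := by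
      rw [List.filter_eq_nil_iff]
      intro a ha
      have := hmid (a + 1) (by omega) (by rw [List.mem_range] at ha; omega)
      simp [Function.comp, Nat.succ_eq_add_one, this]
    rw [this]
    simp
  rw [hfirst]
  have hsecond : List.filter ((fun i => pvS rows i % 2 == 0) ∘ fun x => k + x) (List.range (rows.length - k)) =
      List.filter (fun j => pvS (rows.drop k) j % 2 == 0) (List.range (rows.length - k)) := by
    apply List.filter_congr
    intro j hj
    rw [List.mem_range] at hj
    have hklt : k < rows.length := by omega
    have heven := hend hklt
    have := pvS_split rows k j
    simp only [Function.comp]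
    rw [this]
    have : (pvS rows k + pvS (rows.drop k) j) % 2 = pvS (rows.drop k) j % 2 := by omega
    rw [this]
  rw [hsecond]
  have hlen : (rows.drop k).length = rows.length - k := by simp
  simp only [List.cons_append, List.nil_append]
  congr 1
  rw [hlen]
  apply List.map_congr_left
  intro x _
  omega

theorem starts_head (r : String) (rest : List String) :
    ∃ t, pvStarts (r :: rest) = 0 :: t := by
  rw [starts_peel]
  exact ⟨_, rfl⟩

theorem starts_nil : pvStarts [] = [] := by simp [pvStarts]

theorem segs_nil : pvSegs [] = [] := by simp [pvSegs, starts_nil]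

theorem segs_peel (r : String) (rest : List String) :
    pvSegs (r :: rest) =
      PySem.Str.join " " ((r :: rest).take (pvSeg false (r :: rest))) ::
        pvSegs ((r :: rest).drop (pvSeg false (r :: rest))) := by
  set rows := r :: rest with hrows
  set k := pvSeg false rows with hk
  have hk1 : 1 ≤ k := pvSeg_pos false r rest
  have hkle : k ≤ rows.length := pvSeg_le false rows
  have hlen : (rows.drop k).length = rows.length - k := by simp
  clear_value k
  clear_value rows
  unfold pvSegs
  have hsp : pvStarts rows = 0 :: (pvStarts (rows.drop k)).map (· + k) := by
    rw [hk, hrows]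
    exact starts_peel r rest
  rw [hsp]
  rcases hdk : rows.drop k with _ | ⟨d, ds⟩
  · -- k = rows.length : single final segment
    have hkn : k = rows.length := by
      have := congrArg List.length hdk
      simp at this
      omega
    simp [starts_nil, hkn]
  · -- drop k rows nonempty: its starts begin with 0
    obtain ⟨t, ht⟩ := starts_head d ds
    rw [ht]
    simp only [List.map_cons, List.drop_succ_cons, List.drop_zero, List.cons_append]
    have hn' : (d :: ds).length = rows.length - k := by rw [← hdk, hlen]
    have hmapapp : (t.map (· + k)) ++ [rows.length] = (t ++ [(d :: ds).length]).map (· + k) := by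
      rw [List.map_append, List.map_singleton, hn']
      congr 2
      omega
    rw [hmapapp]
    rw [List.zip_cons_cons]
    have hmcons : ((0 + k) :: List.map (fun x => x + k) t) = List.map (fun x => x + k) (0 :: t) := by
      simp [Nat.add_comm]
    rw [hmcons, List.zip_map]
    simp only [List.map_cons, List.map_map]
    congr 1
    · simp
    · apply List.map_congr_left
      intro be _
      have h2 : be.2 + k - (be.1 + k) = be.2 - be.1 := by omega
      have h3 : List.drop (be.1 + k) rows = List.drop be.1 (d :: ds) := by
        rw [← hdk, List.drop_drop, Nat.add_comm]
      simp [Function.comp, Prod.map, h2, h3]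

-- B's Int-level three stages compute pvSegs
theorem pref_eq (rows : List String) :
    rows.foldl (fun (acc : List Int) r => acc ++ [acc.getLast! + (PySem.Str.count r "\"" : Int)]) [0]
      = (List.range (rows.length + 1)).map (fun i => ((pvS rows i : Nat) : Int)) := by
  induction rows using List.reverseRecOn with
  | nil => simp [pvS]
  | append_singleton rows r ih =>
    rw [List.foldl_append, ih]
    simp only [List.foldl_cons, List.foldl_nil]
    have hlast : ((List.range (rows.length + 1)).map (fun i => ((pvS rows i : Nat) : Int))).getLast!
        = ((pvS rows rows.length : Nat) : Int) := by
      rw [List.range_succ, List.map_append]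
      exact getLast!_append_singleton _ _
    rw [hlast]
    have hlen2 : (rows ++ [r]).length + 1 = (rows.length + 1) + 1 := by simp
    have hr : List.map (fun i => ((pvS (rows ++ [r]) i : Nat) : Int)) (List.range ((rows.length + 1) + 1))
        = List.map (fun i => ((pvS (rows ++ [r]) i : Nat) : Int)) (List.range (rows.length + 1))
          ++ [((pvS (rows ++ [r]) (rows.length + 1) : Nat) : Int)] := by
      rw [List.range_succ]
      simp
    rw [hlen2, hr]
    congr 1
    · apply List.map_congr_left
      intro i hi
      rw [List.mem_range] at hi
      have : pvS (rows ++ [r]) i = pvS rows i := by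
        unfold pvS
        rw [List.take_append_of_le_length (by omega)]
      rw [this]
    · have hfull : pvS (rows ++ [r]) (rows.length + 1) = pvS rows rows.length + pvCnt r := by
        unfold pvS
        rw [List.take_of_length_le (by simp), List.take_of_length_le (by omega)]
        simp
      rw [hfull]
      unfold pvCnt
      push_cast
      ring_nf

theorem alt_eq_segs (rows : List String) : fix_newline_between_quotes_alt rows = pvSegs rows := by
  simp only [fix_newline_between_quotes_alt]
  rw [pref_eq, PySem.List.pyRange_zero_nat, List.filter_map]
  have hfc : List.filter
      ((fun i => PySem.Int.mod ((PySem.List.pyGet?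
          ((List.range (rows.length + 1)).map (fun i => ((pvS rows i : Nat) : Int))) i).getD 0) 2 == 0)
        ∘ (fun (k : Nat) => (k : Int))) (List.range rows.length) = pvStarts rows := by
    unfold pvStarts
    apply List.filter_congr
    intro i hi
    rw [List.mem_range] at hi
    simp only [Function.comp]
    rw [PySem.List.pyGet?_natCast, List.getElem?_map, List.getElem?_range (by omega)]
    simp only [Option.map_some, Option.getD_some]
    rw [PySem.Int.mod_eq_emod_of_pos (by norm_num)]
    by_cases h : pvS rows i % 2 = 0
    · have h2 : ((pvS rows i : Nat) : Int) % 2 = 0 := by omega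
      simp [h, h2]
    · have h2 : ¬ (((pvS rows i : Nat) : Int) % 2 = 0) := by omega
      simp [h, h2]
  rw [hfc]
  have hends : (List.map (fun (k : Nat) => (k : Int)) (pvStarts rows)).drop 1 ++ [(rows.length : Int)]
      = List.map (fun (k : Nat) => (k : Int)) ((pvStarts rows).drop 1 ++ [rows.length]) := by
    simp
  rw [hends, List.zip_map, List.map_map]
  unfold pvSegs
  apply List.map_congr_left
  intro be _
  simp only [Function.comp, Prod.map]
  rw [PySem.List.slice_natCast]

theorem buf_eq_segs_n : ∀ (n : Nat) (rows : List String), rows.length ≤ n → pvBuf rows = pvSegs rows := by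
  intro n
  induction n with
  | zero =>
    intro rows h
    have : rows = [] := by
      cases rows with
      | nil => rfl
      | cons a t => simp at h
    subst this
    simp [pvBuf, pvFlush, segs_nil]
  | succ n ih =>
    intro rows h
    cases rows with
    | nil => simp [pvBuf, pvFlush, segs_nil]
    | cons r rest =>
      rw [buf_peel, segs_peel]
      congr 1
      apply ih
      have hk1 := pvSeg_pos false r rest
      have hlen : ((r :: rest).drop (pvSeg false (r :: rest))).length
          = (r :: rest).length - pvSeg false (r :: rest) := by simp
      rw [hlen]
      simp only [List.length_cons] at h ⊢
      omega

theorem buf_eq_segs (rows : List String) : pvBuf rows = pvSegs rows :=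
  buf_eq_segs_n rows.length rows le_rfl

-- ===== VERDICT (by name: the statement is the Claim_ definition above) =====
theorem fix_newline_between_quotes_spec : Claim_equal_fix_newline_between_quotes := by
  intro rows _
  unfold Spec_fix_newline_between_quotes
  rw [a_eq_buf, buf_eq_segs, alt_eq_segs]
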